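-- pv_equiv track=rewrite | github.com/zuoqing1988/ZQCNN | TensorFlow_to_ZQCNN/convertor.py | _H_WNC_to_NCHW
-- ===== SOURCE A (Python) =====
-- def _H_WNC_to_NCHW(in_data, N, C, H, W):
--     out_data = list()
--     num_float = N*C*H*W
--     WNC = W*N*C
--     NC = N*C
--
--     for n in range(N):
--         for c in range(C):
--             for h in range(H):
--                 for w in range(W):
--                     out_data.append(in_data[(H-1-h)*WNC+(W-1-w)*NC+n*C+c])
--     return out_data
-- ===== SOURCE B (Python) =====
-- def _H_WNC_to_NCHW(in_data, N, C, H, W):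
--     # scatter: walk the flat input once in its native HWNC order and write each
--     # element straight to its NCHW destination in a preallocated buffer
--     if N <= 0 or C <= 0 or H <= 0 or W <= 0:
--         return []
--     num_float = N * C * H * W
--     WNC = W * N * C
--     NC = N * C
--     HW = H * W
--     CHW = C * HW
--     out_data = [0] * num_float
--     for i in range(num_float):
--         hp, r = divmod(i, WNC)
--         wp, r = divmod(r, NC)
--         n, c = divmod(r, C)
--         out_data[n * CHW + c * HW + (H - 1 - hp) * W + (W - 1 - wp)] = in_data[i]
--     return out_data
-- ===== Notes on version B (the rewrite author's own statement) =====
-- stated objective: alternative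
-- what changed: A gathers: four nested loops over NCHW destination coordinates, each computing its HWNC source index; B scatters: one flat pass over the input in source order, decoding each position by successive divmods and writing it into a preallocated output buffer.
import Mathlib
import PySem

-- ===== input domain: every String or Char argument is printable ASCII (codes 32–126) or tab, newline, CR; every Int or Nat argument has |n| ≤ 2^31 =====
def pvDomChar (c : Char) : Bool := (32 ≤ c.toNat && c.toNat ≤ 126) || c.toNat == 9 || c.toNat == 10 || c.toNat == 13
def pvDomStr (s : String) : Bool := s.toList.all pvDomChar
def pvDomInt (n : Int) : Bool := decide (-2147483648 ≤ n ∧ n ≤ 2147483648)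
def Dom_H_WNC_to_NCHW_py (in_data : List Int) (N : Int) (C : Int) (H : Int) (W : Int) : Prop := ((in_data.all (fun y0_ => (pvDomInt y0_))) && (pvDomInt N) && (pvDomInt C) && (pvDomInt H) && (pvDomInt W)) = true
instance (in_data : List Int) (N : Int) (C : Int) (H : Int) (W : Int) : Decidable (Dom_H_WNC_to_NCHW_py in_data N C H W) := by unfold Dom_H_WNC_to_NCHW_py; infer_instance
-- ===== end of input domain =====

-- B replaces A's gather (loop over NCHW destinations, compute the HWNC source index)
-- by a single flat scatter pass over the input in source order (decode i by divmods,
-- write into a preallocated buffer); objective: alternative decomposition, same cost.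

-- ===== PORT A =====
def H_WNC_to_NCHW_py (in_data : List Int) (N : Int) (C : Int) (H : Int) (W : Int) : List Int :=
  let WNC := W*N*C
  let NC := N*C
  (PySem.List.pyRange 0 N 1).foldl (fun out n =>
    (PySem.List.pyRange 0 C 1).foldl (fun out c =>
      (PySem.List.pyRange 0 H 1).foldl (fun out h =>
        (PySem.List.pyRange 0 W 1).foldl (fun out w =>
          out ++ [PySem.List.pyGetD in_data ((H-1-h)*WNC+(W-1-w)*NC+n*C+c) 0]) out) out) out) []

-- ===== PORT B =====
def H_WNC_to_NCHW_py_alt (in_data : List Int) (N : Int) (C : Int) (H : Int) (W : Int) : List Int :=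
  if N ≤ 0 ∨ C ≤ 0 ∨ H ≤ 0 ∨ W ≤ 0 then []
  else
    let numf := N*C*H*W
    let WNC := W*N*C
    let NC := N*C
    let HW := H*W
    let CHW := C*HW
    (PySem.List.pyRange 0 numf 1).foldl (fun out i =>
      let hp := PySem.Int.floordiv i WNC
      let r1 := PySem.Int.mod i WNC
      let wp := PySem.Int.floordiv r1 NC
      let r2 := PySem.Int.mod r1 NC
      let n := PySem.Int.floordiv r2 C
      let c := PySem.Int.mod r2 C
      PySem.List.pySetD out (n*CHW + c*HW + (H-1-hp)*W + (W-1-wp)) (PySem.List.pyGetD in_data i 0))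
      (PySem.List.pyRepeat [0] numf)

-- ===== PRECONDITION & SPEC =====
-- Pre_ excludes exactly the inputs where Python A raises IndexError: positive
-- dimensions whose product exceeds the length of the flat input list.
def Pre_H_WNC_to_NCHW_py (in_data : List Int) (N : Int) (C : Int) (H : Int) (W : Int) : Prop :=
  (0 < N ∧ 0 < C ∧ 0 < H ∧ 0 < W) → N*C*H*W ≤ in_data.length
instance (in_data : List Int) (N : Int) (C : Int) (H : Int) (W : Int) : Decidable (Pre_H_WNC_to_NCHW_py in_data N C H W) := by unfold Pre_H_WNC_to_NCHW_py; infer_instance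

def pvWitness_H_WNC_to_NCHW_py : List Int × Int × Int × Int × Int := ([1, 2, 3, 4, 5, 6, 7, 8, 9, 10, 11, 12], 2, 3, 2, 1)

def Spec_H_WNC_to_NCHW_py (in_data : List Int) (N : Int) (C : Int) (H : Int) (W : Int) (out : List Int) : Prop := out = H_WNC_to_NCHW_py_alt in_data N C H W
instance (in_data : List Int) (N : Int) (C : Int) (H : Int) (W : Int) (out : List Int) : Decidable (Spec_H_WNC_to_NCHW_py in_data N C H W out) := by unfold Spec_H_WNC_to_NCHW_py; infer_instance

-- ===== CLAIM (what is proved, stated in full; the proofs are below) =====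
def Claim_equal_H_WNC_to_NCHW_py : Prop := ∀ (in_data : List Int) (N : Int) (C : Int) (H : Int) (W : Int), Dom_H_WNC_to_NCHW_py in_data N C H W → Pre_H_WNC_to_NCHW_py in_data N C H W → Spec_H_WNC_to_NCHW_py in_data N C H W (H_WNC_to_NCHW_py in_data N C H W)

-- ===== LEMMAS AND PROOFS =====

-- the source index A reads for destination position (n, c, h, w), in ℕ
def pvSrc (nN nC nH nW : ℕ) (n c h w : ℕ) : ℕ := (((nH-1-h)*nW + (nW-1-w))*nN + n)*nC + c
-- gather map: destination position j ↦ source index (decode j in NCHW mixed radix)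
def pvS (nN nC nH nW : ℕ) (j : ℕ) : ℕ := pvSrc nN nC nH nW (j / nW / nH / nC) (j / nW / nH % nC) (j / nW % nH) (j % nW)
-- scatter map: source index i ↦ destination position (decode i in HWNC mixed radix)
def pvG (nN nC nH nW : ℕ) (i : ℕ) : ℕ :=
  ((i % (nW*nN*nC) % (nN*nC) / nC * nC + i % (nW*nN*nC) % (nN*nC) % nC)*nH
      + (nH-1 - i / (nW*nN*nC)))*nW
    + (nW-1 - i % (nW*nN*nC) / (nN*nC))

theorem pv_split2 (a b B : ℕ) (hb : b < B) : (a*B + b) / B = a ∧ (a*B + b) % B = b := by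
  have hB : 0 < B := by omega
  constructor
  · rw [mul_comm, Nat.mul_add_div hB, Nat.div_eq_of_lt hb, add_zero]
  · rw [mul_comm, Nat.mul_add_mod, Nat.mod_eq_of_lt hb]

theorem pv_enc2_lt (a b A B : ℕ) (ha : a < A) (hb : b < B) : a*B + b < A*B := by
  calc a*B + b < a*B + B := by omega
    _ = (a+1)*B := by ring
    _ ≤ A*B := Nat.mul_le_mul_right B ha

-- decode-bottom: pvS applied to an NCHW-encoded position recovers the components
theorem pvS_enc (nN nC nH nW n c h w : ℕ) (hc : c < nC) (hh : h < nH) (hw : w < nW) :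
    pvS nN nC nH nW (((n*nC + c)*nH + h)*nW + w) = pvSrc nN nC nH nW n c h w := by
  have h1 := pv_split2 ((n*nC + c)*nH + h) w nW hw
  have h2 := pv_split2 (n*nC + c) h nH hh
  have h3 := pv_split2 n c nC hc
  unfold pvS
  rw [h1.1, h1.2, h2.1, h2.2, h3.1, h3.2]

-- decode-top: pvG applied to an HWNC-encoded source index recovers the components
theorem pvG_enc (nN nC nH nW hp wp n c : ℕ) (hhp : hp < nH) (hwp : wp < nW) (hn : n < nN) (hc : c < nC) :
    pvG nN nC nH nW (((hp*nW + wp)*nN + n)*nC + c) = ((n*nC + c)*nH + (nH-1-hp))*nW + (nW-1-wp) := by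
  have hb1 : (wp*nN + n)*nC + c < nW*nN*nC := pv_enc2_lt _ _ _ _ (pv_enc2_lt _ _ _ _ hwp hn) hc
  have e1 : ((hp*nW + wp)*nN + n)*nC + c = hp*(nW*nN*nC) + ((wp*nN + n)*nC + c) := by ring
  have h1 := pv_split2 hp ((wp*nN + n)*nC + c) (nW*nN*nC) hb1
  have hb2 : n*nC + c < nN*nC := pv_enc2_lt _ _ _ _ hn hc
  have e2 : (wp*nN + n)*nC + c = wp*(nN*nC) + (n*nC + c) := by ring
  have h2 := pv_split2 wp (n*nC + c) (nN*nC) hb2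
  have h3 := pv_split2 n c nC hc
  unfold pvG
  rw [e1, h1.1, h1.2, e2, h2.1, h2.2, h3.1, h3.2]

theorem pvG_S (nN nC nH nW : ℕ) (hN : 0 < nN) (hC : 0 < nC) (hH : 0 < nH) (hW : 0 < nW)
    (j : ℕ) (hj : j < nN*(nC*(nH*nW))) :
    pvG nN nC nH nW (pvS nN nC nH nW j) = j ∧ pvS nN nC nH nW j < nN*(nC*(nH*nW)) := by
  set w := j % nW with hw_def
  set h := j / nW % nH with hh_def
  set c := j / nW / nH % nC with hc_def
  set n := j / nW / nH / nC with hn_def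
  have hw : w < nW := Nat.mod_lt _ hW
  have hh : h < nH := Nat.mod_lt _ hH
  have hc : c < nC := Nat.mod_lt _ hC
  have hn : n < nN := by
    rw [hn_def, Nat.div_lt_iff_lt_mul hC, Nat.div_lt_iff_lt_mul hH, Nat.div_lt_iff_lt_mul hW]
    calc j < nN*(nC*(nH*nW)) := hj
      _ = nN*nC*nH*nW := by ring
  have e3 : n*nC + c = j / nW / nH := by rw [hn_def, hc_def, mul_comm]; exact Nat.div_add_mod _ _
  have e4 : (n*nC + c)*nH + h = j / nW := by rw [e3, hh_def, mul_comm]; exact Nat.div_add_mod _ _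
  have e5 : ((n*nC + c)*nH + h)*nW + w = j := by rw [e4, hw_def, mul_comm]; exact Nat.div_add_mod _ _
  have hS : pvS nN nC nH nW j = pvSrc nN nC nH nW n c h w := rfl
  clear_value w h c n
  constructor
  · rw [hS]
    have := pvG_enc nN nC nH nW (nH-1-h) (nW-1-w) n c (by omega) (by omega) hn hc
    unfold pvSrc
    rw [this]
    have r1 : nH-1-(nH-1-h) = h := by omega
    have r2 : nW-1-(nW-1-w) = w := by omega
    rw [r1, r2, e5]
  · rw [hS]
    unfold pvSrc
    have hb : (((nH-1-h)*nW + (nW-1-w))*nN + n)*nC + c < ((nH*nW)*nN)*nC :=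
      pv_enc2_lt _ _ _ _ (pv_enc2_lt _ _ _ _ (pv_enc2_lt _ _ _ _ (by omega) (by omega)) hn) hc
    exact lt_of_lt_of_eq hb (by ring)

theorem pvS_G (nN nC nH nW : ℕ) (hN : 0 < nN) (hC : 0 < nC) (hH : 0 < nH) (hW : 0 < nW)
    (i : ℕ) (hi : i < nN*(nC*(nH*nW))) :
    pvS nN nC nH nW (pvG nN nC nH nW i) = i ∧ pvG nN nC nH nW i < nN*(nC*(nH*nW)) := by
  have hWNC : 0 < nW*nN*nC := by positivity
  have hNC : 0 < nN*nC := by positivity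
  set hp := i / (nW*nN*nC) with hhp_def
  set r := i % (nW*nN*nC) with hr_def
  set wp := r / (nN*nC) with hwp_def
  set r2 := r % (nN*nC) with hr2_def
  set n := r2 / nC with hn_def
  set c := r2 % nC with hc_def
  have hhp : hp < nH := by
    rw [hhp_def, Nat.div_lt_iff_lt_mul hWNC]
    calc i < nN*(nC*(nH*nW)) := hi
      _ = nH*(nW*nN*nC) := by ring
  have hr : r < nW*nN*nC := Nat.mod_lt _ hWNC
  have hwp : wp < nW := by
    rw [hwp_def, Nat.div_lt_iff_lt_mul hNC]
    calc r < nW*nN*nC := hr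
      _ = nW*(nN*nC) := by ring
  have hr2 : r2 < nN*nC := Nat.mod_lt _ hNC
  have hn : n < nN := by
    rw [hn_def, Nat.div_lt_iff_lt_mul hC]
    exact hr2
  have hc : c < nC := Nat.mod_lt _ hC
  have e1 : nC*n + c = r2 := Nat.div_add_mod _ _
  have e2 : (nN*nC)*wp + r2 = r := Nat.div_add_mod _ _
  have e3 : (nW*nN*nC)*hp + r = i := Nat.div_add_mod _ _
  have ei : i = ((hp*nW + wp)*nN + n)*nC + c := by
    rw [← e3, ← e2, ← e1]; ring
  have hG : pvG nN nC nH nW i = ((n*nC + c)*nH + (nH-1-hp))*nW + (nW-1-wp) := rfl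
  clear_value hp r wp r2 n c
  constructor
  · rw [hG, pvS_enc nN nC nH nW n c (nH-1-hp) (nW-1-wp) hc (by omega) (by omega)]
    unfold pvSrc
    have r1 : nH-1-(nH-1-hp) = hp := by omega
    have r2' : nW-1-(nW-1-wp) = wp := by omega
    rw [r1, r2', ← ei]
  · rw [hG]
    have hb : ((n*nC + c)*nH + (nH-1-hp))*nW + (nW-1-wp) < (((nN*nC)*nH)*nW) :=
      pv_enc2_lt _ _ _ _ (pv_enc2_lt _ _ _ _ (pv_enc2_lt _ _ _ _ hn hc) (by omega)) (by omega)
    exact lt_of_lt_of_eq hb (by ring)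

-- scatter fold: each position written by some source index holds that source's value
theorem pv_foldl_set {α : Type} (g : ℕ → ℕ) (v : ℕ → α) (m : ℕ) (init : List α)
    (hinj : ∀ i i', i < m → i' < m → g i = g i' → i = i')
    (hlt : ∀ i, i < m → g i < init.length) :
    ∀ k, k ≤ m →
      ((List.range k).foldl (fun out i => out.set (g i) (v i)) init).length = init.length ∧
      (∀ i, i < k → ((List.range k).foldl (fun out i => out.set (g i) (v i)) init)[g i]? = some (v i)) := by
  intro k
  induction k with
  | zero => intro _; simp
  | succ k ih =>
    intro hk
    obtain ⟨ihlen, ihval⟩ := ih (by omega)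
    rw [List.range_succ, List.foldl_append, List.foldl_cons, List.foldl_nil]
    refine ⟨by rw [List.length_set]; exact ihlen, ?_⟩
    intro i hi
    by_cases heq : i = k
    · subst heq
      exact List.getElem?_set_self (by rw [ihlen]; exact hlt i (by omega))
    · have hne : g k ≠ g i := fun h => heq (hinj i k (by omega) (by omega) h.symm)
      rw [List.getElem?_set_ne hne]
      exact ihval i (by omega)

theorem pv_map_range_mul {α : Type} (a b : ℕ) (g : ℕ → α) :
    (List.range (a*b)).map g = (List.range a).flatMap (fun i => (List.range b).map (fun j => g (b*i + j))) := by
  induction a with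
  | zero => simp
  | succ a ih =>
    rw [Nat.succ_mul, List.range_add, List.map_append, ih, List.range_succ, List.flatMap_append]
    simp [List.map_map, Function.comp_def, Nat.mul_comm]

theorem pvA_nat (in_data : List Int) (nN nC nH nW : ℕ) (hN : 0 < nN) (hC : 0 < nC) (hH : 0 < nH) (hW : 0 < nW) :
    H_WNC_to_NCHW_py in_data (nN : ℤ) (nC : ℤ) (nH : ℤ) (nW : ℤ) =
    (List.range nN).flatMap (fun n => (List.range nC).flatMap (fun c =>
      (List.range nH).flatMap (fun h => (List.range nW).map (fun w =>
        in_data.getD (pvSrc nN nC nH nW n c h w) 0)))) := by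
  unfold H_WNC_to_NCHW_py
  simp only [PySem.List.pyRange_one, sub_zero, Int.toNat_natCast, zero_add, List.foldl_map,
    PySem.List.foldl_append_singleton_eq_map, PySem.List.foldl_append_eq_flatMap, List.nil_append]
  apply List.flatMap_congr; intro n hn
  apply List.flatMap_congr; intro c hc
  apply List.flatMap_congr; intro h hh
  apply List.map_congr_left; intro w hw
  rw [List.mem_range] at hn hc hh hw
  have c1 : ((nH : ℤ) - 1 - (h : ℤ)) = ((nH - 1 - h : ℕ) : ℤ) := by omega
  have c2 : ((nW : ℤ) - 1 - (w : ℤ)) = ((nW - 1 - w : ℕ) : ℤ) := by omega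
  have cidx : ((nH : ℤ) - 1 - (h : ℤ))*((nW : ℤ)*(nN : ℤ)*(nC : ℤ))
      + ((nW : ℤ) - 1 - (w : ℤ))*((nN : ℤ)*(nC : ℤ)) + (n : ℤ)*(nC : ℤ) + (c : ℤ)
      = ((pvSrc nN nC nH nW n c h w : ℕ) : ℤ) := by
    rw [c1, c2]; unfold pvSrc; push_cast; ring
  rw [cidx, PySem.List.pyGetD_natCast]

theorem pvB_nat (in_data : List Int) (nN nC nH nW : ℕ) (hN : 0 < nN) (hC : 0 < nC) (hH : 0 < nH) (hW : 0 < nW) :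
    H_WNC_to_NCHW_py_alt in_data (nN : ℤ) (nC : ℤ) (nH : ℤ) (nW : ℤ) =
    (List.range (nN*(nC*(nH*nW)))).foldl
      (fun out i => out.set (pvG nN nC nH nW i) (in_data.getD i 0))
      (List.replicate (nN*(nC*(nH*nW))) 0) := by
  unfold H_WNC_to_NCHW_py_alt
  rw [if_neg (by push_cast; omega)]
  have hM : (nN : ℤ)*(nC : ℤ)*(nH : ℤ)*(nW : ℤ) = ((nN*(nC*(nH*nW)) : ℕ) : ℤ) := by push_cast; ring
  simp only [hM, PySem.List.pyRange_one, PySem.List.pyRepeat_singleton, sub_zero,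
    Int.toNat_natCast, zero_add, List.foldl_map]
  apply PySem.List.foldl_congr_mem
  intro out iN hi
  have hiN : iN < nN*(nC*(nH*nW)) := List.mem_range.mp hi
  have hWNC : ((nW : ℤ)*(nN : ℤ)*(nC : ℤ)) = ((nW*nN*nC : ℕ) : ℤ) := by push_cast; ring
  have hNC : ((nN : ℤ)*(nC : ℤ)) = ((nN*nC : ℕ) : ℤ) := by push_cast; ring
  rw [hWNC, hNC, PySem.Int.floordiv_natCast, PySem.Int.mod_natCast,
    PySem.Int.floordiv_natCast, PySem.Int.mod_natCast,
    PySem.Int.floordiv_natCast, PySem.Int.mod_natCast]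
  have hhp : iN / (nW*nN*nC) < nH := by
    have hpos : 0 < nW*nN*nC := by positivity
    rw [Nat.div_lt_iff_lt_mul hpos]
    calc iN < nN*(nC*(nH*nW)) := hiN
      _ = nH*(nW*nN*nC) := by ring
  have hwp : iN % (nW*nN*nC) / (nN*nC) < nW := by
    have hpos : 0 < nN*nC := by positivity
    rw [Nat.div_lt_iff_lt_mul hpos]
    calc iN % (nW*nN*nC) < nW*nN*nC := Nat.mod_lt _ (by positivity)
      _ = nW*(nN*nC) := by ring
  have c1 : ((nH : ℤ) - 1 - ((iN / (nW*nN*nC) : ℕ) : ℤ)) = ((nH - 1 - iN / (nW*nN*nC) : ℕ) : ℤ) := by omega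
  have c2 : ((nW : ℤ) - 1 - ((iN % (nW*nN*nC) / (nN*nC) : ℕ) : ℤ)) = ((nW - 1 - iN % (nW*nN*nC) / (nN*nC) : ℕ) : ℤ) := by omega
  have cdest : ((iN % (nW*nN*nC) % (nN*nC) / nC : ℕ) : ℤ)*((nC : ℤ)*((nH : ℤ)*(nW : ℤ)))
      + ((iN % (nW*nN*nC) % (nN*nC) % nC : ℕ) : ℤ)*((nH : ℤ)*(nW : ℤ))
      + ((nH : ℤ) - 1 - ((iN / (nW*nN*nC) : ℕ) : ℤ))*(nW : ℤ)
      + ((nW : ℤ) - 1 - ((iN % (nW*nN*nC) / (nN*nC) : ℕ) : ℤ))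
      = ((pvG nN nC nH nW iN : ℕ) : ℤ) := by
    rw [c1, c2]; unfold pvG; push_cast; ring
  rw [cdest, PySem.List.pySetD_natCast, PySem.List.pyGetD_natCast]

theorem pvScatter (in_data : List Int) (nN nC nH nW : ℕ) (hN : 0 < nN) (hC : 0 < nC) (hH : 0 < nH) (hW : 0 < nW) :
    (List.range (nN*(nC*(nH*nW)))).foldl
      (fun out i => out.set (pvG nN nC nH nW i) (in_data.getD i 0))
      (List.replicate (nN*(nC*(nH*nW))) 0) =
    (List.range (nN*(nC*(nH*nW)))).map (fun j => in_data.getD (pvS nN nC nH nW j) 0) := by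
  have hinj : ∀ i i', i < nN*(nC*(nH*nW)) → i' < nN*(nC*(nH*nW)) → pvG nN nC nH nW i = pvG nN nC nH nW i' → i = i' := by
    intro i i' hi hi' he
    have h1 := (pvS_G nN nC nH nW hN hC hH hW i hi).1
    have h2 := (pvS_G nN nC nH nW hN hC hH hW i' hi').1
    rw [← h1, ← h2, he]
  obtain ⟨hlen, hval⟩ := pv_foldl_set (pvG nN nC nH nW) (fun i => in_data.getD i 0)
    (nN*(nC*(nH*nW))) (List.replicate (nN*(nC*(nH*nW))) 0) hinj
    (fun i hi => by rw [List.length_replicate]; exact (pvS_G nN nC nH nW hN hC hH hW i hi).2)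
    (nN*(nC*(nH*nW))) le_rfl
  apply List.ext_getElem?
  intro j
  by_cases hj : j < nN*(nC*(nH*nW))
  · obtain ⟨hGS, hlt⟩ := pvG_S nN nC nH nW hN hC hH hW j hj
    have := hval (pvS nN nC nH nW j) hlt
    rw [hGS] at this
    rw [this]
    rw [List.getElem?_map, List.getElem?_range hj]
    rfl
  · rw [List.getElem?_eq_none (by rw [hlen, List.length_replicate]; omega),
      List.getElem?_eq_none (by rw [List.length_map, List.length_range]; omega)]

theorem pvFlat (in_data : List Int) (nN nC nH nW : ℕ) (hN : 0 < nN) (hC : 0 < nC) (hH : 0 < nH) (hW : 0 < nW) :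
    (List.range (nN*(nC*(nH*nW)))).map (fun j => in_data.getD (pvS nN nC nH nW j) 0) =
    (List.range nN).flatMap (fun n => (List.range nC).flatMap (fun c =>
      (List.range nH).flatMap (fun h => (List.range nW).map (fun w =>
        in_data.getD (pvSrc nN nC nH nW n c h w) 0)))) := by
  rw [pv_map_range_mul]
  apply List.flatMap_congr; intro n hn
  rw [pv_map_range_mul]
  apply List.flatMap_congr; intro c hc
  rw [pv_map_range_mul]
  apply List.flatMap_congr; intro h hh
  apply List.map_congr_left; intro w hw
  rw [List.mem_range] at hn hc hh hw
  have e : nC*(nH*nW)*n + (nH*nW*c + (nW*h + w)) = ((n*nC + c)*nH + h)*nW + w := by ring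
  rw [e, pvS_enc nN nC nH nW n c h w hc hh hw]

theorem pv_foldl_const {α β : Type} (l : List α) (init : β) : l.foldl (fun acc _ => acc) init = init :=
  List.foldl_fixed l

-- ===== VERDICT (by name: the statement is the Claim_ definition above) =====
theorem H_WNC_to_NCHW_py_spec : Claim_equal_H_WNC_to_NCHW_py := by
  intro in_data N C H W _ _
  unfold Spec_H_WNC_to_NCHW_py
  by_cases hdeg : N ≤ 0 ∨ C ≤ 0 ∨ H ≤ 0 ∨ W ≤ 0
  · unfold H_WNC_to_NCHW_py_alt
    rw [if_pos hdeg]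
    rcases hdeg with h|h|h|h
    all_goals simp [H_WNC_to_NCHW_py, PySem.List.pyRange_one_eq_nil h, pv_foldl_const]
  · push_neg at hdeg
    obtain ⟨hN, hC, hH, hW⟩ := hdeg
    obtain ⟨nN, rfl⟩ : ∃ k : ℕ, N = (k : ℤ) := ⟨N.toNat, (Int.toNat_of_nonneg hN.le).symm⟩
    obtain ⟨nC, rfl⟩ : ∃ k : ℕ, C = (k : ℤ) := ⟨C.toNat, (Int.toNat_of_nonneg hC.le).symm⟩
    obtain ⟨nH, rfl⟩ : ∃ k : ℕ, H = (k : ℤ) := ⟨H.toNat, (Int.toNat_of_nonneg hH.le).symm⟩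
    obtain ⟨nW, rfl⟩ : ∃ k : ℕ, W = (k : ℤ) := ⟨W.toNat, (Int.toNat_of_nonneg hW.le).symm⟩
    have hN' : 0 < nN := by exact_mod_cast hN
    have hC' : 0 < nC := by exact_mod_cast hC
    have hH' : 0 < nH := by exact_mod_cast hH
    have hW' : 0 < nW := by exact_mod_cast hW
    rw [pvA_nat in_data nN nC nH nW hN' hC' hH' hW',
      pvB_nat in_data nN nC nH nW hN' hC' hH' hW',
      pvScatter in_data nN nC nH nW hN' hC' hH' hW',
      pvFlat in_data nN nC nH nW hN' hC' hH' hW']
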